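-- pv_equiv track=rewrite | github.com/harshalnpatil/n8n_utilities_2026 | n8n_extract_sync_2026_03_11/scripts/n8n_migrate.py | build_target_name_index
-- ===== SOURCE A (Python) =====
-- from typing import Any, Dict, List
--
-- def build_target_name_index(items: List[Dict[str, Any]]) -> Dict[str, List[str]]:
--     name_map: Dict[str, List[str]] = {}
--     for item in items:
--         name = str(item.get("name", "")).strip()
--         workflow_id = item.get("id")
--         if name and workflow_id is not None:
--             name_map.setdefault(name, []).append(str(workflow_id))
--     return name_map
-- ===== SOURCE B (Python) =====
-- from typing import Any, Dict, List
--
-- def build_target_name_index(items: List[Dict[str, Any]]) -> Dict[str, List[str]]: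
--     def key(item):
--         return str(item.get("name", "")).strip()
--     names: List[str] = []
--     for item in items:
--         n = key(item)
--         if n and item.get("id") is not None and n not in names:
--             names.append(n)
--     return {n: [str(it.get("id")) for it in items if key(it) == n and it.get("id") is not None]
--             for n in names}
-- ===== Notes on version B (the rewrite author's own statement) =====
-- stated objective: alternative
-- what changed: Replaced A's single-pass dict with setdefault-append by a two-stage scan: first collect the distinct eligible stripped names in first-seen order, then build each name's id list with a separate comprehension over the whole items list (no intermediate dict or pair list).
import Mathlib
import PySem

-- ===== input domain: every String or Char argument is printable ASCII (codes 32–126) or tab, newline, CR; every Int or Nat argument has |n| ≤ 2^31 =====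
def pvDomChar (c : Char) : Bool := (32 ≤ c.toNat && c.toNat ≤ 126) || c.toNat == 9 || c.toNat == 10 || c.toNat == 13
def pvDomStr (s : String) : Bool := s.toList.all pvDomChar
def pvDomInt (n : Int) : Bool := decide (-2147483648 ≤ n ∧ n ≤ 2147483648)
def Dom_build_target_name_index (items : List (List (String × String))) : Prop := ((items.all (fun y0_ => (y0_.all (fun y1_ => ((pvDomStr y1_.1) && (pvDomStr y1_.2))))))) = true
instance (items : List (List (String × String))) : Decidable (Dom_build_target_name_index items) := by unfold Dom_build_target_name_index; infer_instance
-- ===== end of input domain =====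

-- B replaces A's single-pass setdefault-append dict with a two-stage scan: first-seen
-- distinct eligible names, then one gathering pass over items per name (alternative decomposition).


-- ===== PORT A =====
def build_target_name_index (items : List (List (String × String))) : List (String × List String) :=
  (items.foldl (fun name_map item =>
      let name := PySem.Str.strip ((PySem.Dict.ofList item).getD "name" "")
      let workflow_id := (PySem.Dict.ofList item).get? "id"
      if name ≠ "" then
        match workflow_id with
        | some w => name_map.modify name [] (· ++ [w])   -- setdefault(name, []).append(str(id))
        | none => name_map
      else name_map)
    (PySem.Dict.empty : PySem.Dict String (List String))).items

-- ===== PORT B =====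
-- helper of B: key(item) = str(item.get("name","")).strip()
def pvKeyB (item : List (String × String)) : String :=
  PySem.Str.strip ((PySem.Dict.ofList item).getD "name" "")

def build_target_name_index_alt (items : List (List (String × String))) : List (String × List String) :=
  let names := items.foldl (fun ns item =>
      let n := pvKeyB item
      if n ≠ "" ∧ ((PySem.Dict.ofList item).get? "id").isSome ∧ n ∉ ns
      then ns ++ [n] else ns) ([] : List String)
  names.map (fun n =>
    (n, items.filterMap (fun it =>
          if pvKeyB it == n then (PySem.Dict.ofList it).get? "id" else none)))

-- ===== PRECONDITION & SPEC =====
def Spec_build_target_name_index (items : List (List (String × String))) (out : List (String × List String)) : Prop := out = build_target_name_index_alt items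
instance (items : List (List (String × String))) (out : List (String × List String)) : Decidable (Spec_build_target_name_index items out) := by unfold Spec_build_target_name_index; infer_instance

-- ===== CLAIM =====
def Claim_equal_build_target_name_index : Prop := ∀ (items : List (List (String × String))), Dom_build_target_name_index items → Spec_build_target_name_index items (build_target_name_index items)

-- ===== LEMMAS AND PROOFS =====

-- the filtered (stripped-name, id) pairs both programs are about
def pvPairsOf (items : List (List (String × String))) : List (String × String) :=
  items.filterMap (fun item =>
    match (PySem.Dict.ofList item).get? "id" with
    | some w => if pvKeyB item ≠ "" then some (pvKeyB item, w) else none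
    | none => none)

lemma mem_pvPairsOf_fst_ne {items : List (List (String × String))} {p : String × String}
    (h : p ∈ pvPairsOf items) : p.1 ≠ "" := by
  simp only [pvPairsOf, List.mem_filterMap] at h
  obtain ⟨it, _, h⟩ := h
  cases hid : (PySem.Dict.ofList it).get? "id" with
  | none => simp [hid] at h
  | some w =>
    by_cases hn : pvKeyB it = "" <;> simp [hid, hn] at h
    subst h; exact hn

lemma a_fold_eq (items : List (List (String × String))) (d : PySem.Dict String (List String)) :
    items.foldl (fun name_map item =>
      let name := PySem.Str.strip ((PySem.Dict.ofList item).getD "name" "")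
      let workflow_id := (PySem.Dict.ofList item).get? "id"
      if name ≠ "" then
        match workflow_id with
        | some w => name_map.modify name [] (· ++ [w])
        | none => name_map
      else name_map) d
    = (pvPairsOf items).foldl (fun d p => d.modify p.1 [] (· ++ [p.2])) d := by
  induction items generalizing d with
  | nil => rfl
  | cons item rest ih =>
    simp only [List.foldl_cons]
    rw [ih]
    simp only [pvPairsOf, List.filterMap_cons]
    cases h : (PySem.Dict.ofList item).get? "id" with
    | none => simp [h]
    | some w =>
      by_cases hn : pvKeyB item = "" <;>
        · simp [pvKeyB] at hn ⊢; simp [h, hn]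

lemma b_names_eq (items : List (List (String × String))) (acc : List String) :
    items.foldl (fun ns item =>
      let n := pvKeyB item
      if n ≠ "" ∧ ((PySem.Dict.ofList item).get? "id").isSome ∧ n ∉ ns
      then ns ++ [n] else ns) acc
    = ((pvPairsOf items).map (·.1)).foldl PySem.Set.add acc := by
  induction items generalizing acc with
  | nil => rfl
  | cons item rest ih =>
    simp only [List.foldl_cons]
    rw [ih]
    cases h : (PySem.Dict.ofList item).get? "id" with
    | none => simp [pvPairsOf, h]
    | some w =>
      by_cases hn : pvKeyB item = ""
      · simp [pvPairsOf, h, hn]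
      · by_cases hm : pvKeyB item ∈ acc
        · simp [pvPairsOf, h, hn, hm, PySem.Set.add]
        · simp [pvPairsOf, h, hn, hm, PySem.Set.add]

lemma b_gather_eq (items : List (List (String × String))) (n : String) (hn : n ≠ "") :
    items.filterMap (fun it =>
        if pvKeyB it == n then (PySem.Dict.ofList it).get? "id" else none)
    = ((pvPairsOf items).filter (fun p => p.1 == n)).map (·.2) := by
  induction items with
  | nil => rfl
  | cons item rest ih =>
    simp only [pvPairsOf, List.filterMap_cons] at ih ⊢
    simp only [beq_iff_eq] at ih
    cases h : (PySem.Dict.ofList item).get? "id" with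
    | none => simpa [h] using ih
    | some w =>
      by_cases hk : pvKeyB item = n
      · have hne : pvKeyB item ≠ "" := hk ▸ hn
        simp [h, hk, hne, hn, ih]
      · by_cases hne : pvKeyB item = "" <;> simp [h, hk, hne, hn, ih]

-- ===== VERDICT =====
theorem build_target_name_index_spec : Claim_equal_build_target_name_index := by
  intro items _
  show build_target_name_index items = build_target_name_index_alt items
  unfold build_target_name_index build_target_name_index_alt
  rw [a_fold_eq, b_names_eq]
  set P := pvPairsOf items with hP
  have hnd : ((P.foldl (fun d p => d.modify p.1 [] (· ++ [p.2])) PySem.Dict.empty)).keys.Nodup :=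
    PySem.Dict.nodup_keys_foldl_modify_key P Prod.fst [] _ _ (by simp)
  rw [PySem.Dict.items_eq_map_keys _ hnd []]
  have hkeys : (P.foldl (fun d p => d.modify p.1 [] (· ++ [p.2])) PySem.Dict.empty).keys
      = (P.map (·.1)).foldl PySem.Set.add [] := by
    rw [PySem.Dict.keys_foldl_modify_key]
    simp [PySem.Set.update, PySem.Dict.keys_empty]
  rw [hkeys]
  apply List.map_congr_left
  intro n hnmem
  have hmem : n ∈ P.map (·.1) := by
    have := PySem.Set.mem_ofList (xs := P.map (·.1)) (y := n)
    rw [PySem.Set.ofList_eq_foldl] at this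
    exact this.mp hnmem
  obtain ⟨p, hp, hpe⟩ := List.mem_map.mp hmem
  have hne : n ≠ "" := hpe ▸ mem_pvPairsOf_fst_ne hp
  rw [PySem.Dict.getD_foldl_modify_append, b_gather_eq items n hne]
  simp [PySem.Dict.getD_empty, hP]
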